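-- pv_equiv track=rewrite | github.com/ilyaodnor/Toets-3 | functions.py | bereken_wachttijd
-- ===== SOURCE A (Python) =====
-- import time, os, sys,math
--
-- def bereken_wachttijd(olibollen, appelflappen):
--     wachttijd = 0
--     olibollen_copy_bakken = olibollen
--     olibollen_copy_verpakken = olibollen
--
--     while olibollen_copy_bakken > 0:
--         olibollen_copy_bakken -= 15
--         wachttijd += 75
--
--     while olibollen_copy_verpakken > 0:
--         olibollen_copy_verpakken -= 10
--         wachttijd += 15
--
--     while appelflappen > 0:
--         appelflappen -= 3
--         wachttijd += 20
--
--
--     wachttijd_in_minuten = math.ceil(wachttijd/60)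
--     return wachttijd_in_minuten
-- ===== SOURCE B (Python) =====
-- def bereken_wachttijd(olibollen, appelflappen):
--     # closed-form: each counting loop runs ceil(x/step) times (0 if x <= 0)
--     bak = -(-olibollen // 15) if olibollen > 0 else 0
--     verpak = -(-olibollen // 10) if olibollen > 0 else 0
--     flap = -(-appelflappen // 3) if appelflappen > 0 else 0
--     wachttijd = 75 * bak + 15 * verpak + 20 * flap
--     return -(-wachttijd // 60)
-- ===== Notes on version B (the rewrite author's own statement) =====
-- stated objective: faster
-- what changed: Replaced the three counting while-loops by closed-form ceiling-division arithmetic, O(1) instead of O(n).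
import Mathlib
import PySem

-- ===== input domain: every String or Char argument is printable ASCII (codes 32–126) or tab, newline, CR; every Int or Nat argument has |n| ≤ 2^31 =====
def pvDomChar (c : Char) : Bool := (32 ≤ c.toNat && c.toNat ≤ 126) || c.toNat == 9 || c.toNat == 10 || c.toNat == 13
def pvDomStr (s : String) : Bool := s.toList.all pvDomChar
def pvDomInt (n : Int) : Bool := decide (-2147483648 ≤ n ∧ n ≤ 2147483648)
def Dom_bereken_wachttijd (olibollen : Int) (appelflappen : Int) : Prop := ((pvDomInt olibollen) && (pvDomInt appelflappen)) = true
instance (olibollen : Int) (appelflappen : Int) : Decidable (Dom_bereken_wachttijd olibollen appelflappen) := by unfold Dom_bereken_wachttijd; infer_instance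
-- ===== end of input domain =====

-- ===== PORT A =====
-- B replaces A's three counting while-loops by closed-form ceiling-division arithmetic (O(1) vs O(n)).
-- Port of A's first while-loop: while olibollen_copy_bakken > 0: -=15, wachttijd += 75
def loopBakken (x : Int) (w : Int) : Int :=
  if x > 0 then loopBakken (x - 15) (w + 75) else w
termination_by x.toNat
decreasing_by omega

def loopVerpakken (x : Int) (w : Int) : Int :=
  if x > 0 then loopVerpakken (x - 10) (w + 15) else w
termination_by x.toNat
decreasing_by omega

def loopFlappen (x : Int) (w : Int) : Int :=
  if x > 0 then loopFlappen (x - 3) (w + 20) else w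
termination_by x.toNat
decreasing_by omega

def bereken_wachttijd (olibollen : Int) (appelflappen : Int) : Int :=
  let wachttijd : Int := 0;
  let wachttijd := loopBakken olibollen wachttijd;
  let wachttijd := loopVerpakken olibollen wachttijd;
  let wachttijd := loopFlappen appelflappen wachttijd;
  -- math.ceil(wachttijd/60): exact as integer ceiling division here, since wachttijd is a
  -- nonnegative int bounded far below 2^53, where float true division then ceil is exact.
  -(PySem.Int.floordiv (-wachttijd) 60)

-- ===== PORT B =====
def bereken_wachttijd_alt (olibollen : Int) (appelflappen : Int) : Int :=
  let bak := if olibollen > 0 then -(PySem.Int.floordiv (-olibollen) 15) else 0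
  let verpak := if olibollen > 0 then -(PySem.Int.floordiv (-olibollen) 10) else 0
  let flap := if appelflappen > 0 then -(PySem.Int.floordiv (-appelflappen) 3) else 0;
  let wachttijd := 75 * bak + 15 * verpak + 20 * flap;
  -(PySem.Int.floordiv (-wachttijd) 60)

-- ===== PRECONDITION & SPEC =====
def Spec_bereken_wachttijd (olibollen : Int) (appelflappen : Int) (out : Int) : Prop := out = bereken_wachttijd_alt olibollen appelflappen
instance (olibollen : Int) (appelflappen : Int) (out : Int) : Decidable (Spec_bereken_wachttijd olibollen appelflappen out) := by unfold Spec_bereken_wachttijd; infer_instance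

-- ===== CLAIM (what is proved, stated in full; the proofs are below) =====
def Claim_equal_bereken_wachttijd : Prop := ∀ (olibollen : Int) (appelflappen : Int), Dom_bereken_wachttijd olibollen appelflappen → Spec_bereken_wachttijd olibollen appelflappen (bereken_wachttijd olibollen appelflappen)

-- ===== LEMMAS AND PROOFS =====

-- ceiling division by a positive divisor, stated via ediv so omega can reason about it
lemma ceil_pos (a b : Int) (hb : 0 < b) :
    -(PySem.Int.floordiv (-a) b) = -((-a) / b) := by
  rw [PySem.Int.floordiv_eq_ediv_of_pos hb]

lemma loopBakken_eq (x w : Int) :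
    loopBakken x w = w + 75 * (if x > 0 then -((-x) / 15) else 0) := by
  induction x, w using loopBakken.induct with
  | case1 x w hx ih =>
      rw [loopBakken, if_pos hx, ih]
      by_cases h : x - 15 > 0 <;> simp only [h, if_pos, if_pos hx] <;> omega
  | case2 x w hx =>
      rw [loopBakken, if_neg hx]
      simp only [if_neg hx]; ring

lemma loopVerpakken_eq (x w : Int) :
    loopVerpakken x w = w + 15 * (if x > 0 then -((-x) / 10) else 0) := by
  induction x, w using loopVerpakken.induct with
  | case1 x w hx ih =>
      rw [loopVerpakken, if_pos hx, ih]
      by_cases h : x - 10 > 0 <;> simp only [h, if_pos, if_pos hx] <;> omega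
  | case2 x w hx =>
      rw [loopVerpakken, if_neg hx]
      simp only [if_neg hx]; ring

lemma loopFlappen_eq (x w : Int) :
    loopFlappen x w = w + 20 * (if x > 0 then -((-x) / 3) else 0) := by
  induction x, w using loopFlappen.induct with
  | case1 x w hx ih =>
      rw [loopFlappen, if_pos hx, ih]
      by_cases h : x - 3 > 0 <;> simp only [h, if_pos, if_pos hx] <;> omega
  | case2 x w hx =>
      rw [loopFlappen, if_neg hx]
      simp only [if_neg hx]; ring

-- ===== VERDICT (by name: the statement is the Claim_ definition above) =====
theorem bereken_wachttijd_spec : Claim_equal_bereken_wachttijd := by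
  intro o a _
  unfold Spec_bereken_wachttijd bereken_wachttijd bereken_wachttijd_alt
  simp only [loopBakken_eq, loopVerpakken_eq, loopFlappen_eq,
    ceil_pos _ _ (by omega : (0:Int) < 60), ceil_pos _ _ (by omega : (0:Int) < 15),
    ceil_pos _ _ (by omega : (0:Int) < 10), ceil_pos _ _ (by omega : (0:Int) < 3)]
  by_cases ho : o > 0 <;> by_cases ha : a > 0 <;> simp only [ho, ha, if_pos, if_neg] <;> ring_nf
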